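-- pv_equiv track=rewrite | github.com/trevor-viljoen/mlbapi | examples/live_scores.py | _pips
-- ===== SOURCE A (Python) =====
-- def _pips(filled: int, total: int, filled_char: str, empty_char: str,
--           filled_style: str = "", empty_style: str = "dim") -> str:
--     parts = []
--     for i in range(total):
--         ch = filled_char if i < filled else empty_char
--         style = filled_style if i < filled else empty_style
--         parts.append(f"[{style}]{ch}[/]" if style else ch)
--     return " ".join(parts)
-- ===== SOURCE B (Python) =====
-- def _pips(filled: int, total: int, filled_char: str, empty_char: str,
--           filled_style: str = "", empty_style: str = "dim") -> str:
--     filled_tok = f"[{filled_style}]{filled_char}[/]" if filled_style else filled_char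
--     empty_tok = f"[{empty_style}]{empty_char}[/]" if empty_style else empty_char
--     n_filled = min(max(filled, 0), max(total, 0))
--     n_empty = max(total, 0) - n_filled
--     if n_empty > 0:
--         return (filled_tok + " ") * n_filled + (empty_tok + " ") * (n_empty - 1) + empty_tok
--     if n_filled > 0:
--         return (filled_tok + " ") * (n_filled - 1) + filled_tok
--     return ""
-- ===== Notes on version B (the rewrite author's own statement) =====
-- stated objective: alternative
-- what changed: Replaces the per-index classify-append-join loop with direct string arithmetic: the two tokens are formatted once and repeated by clamped counts with the separator attached via string multiplication (the last token bare) — no list, no join, no loop.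
import Mathlib
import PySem

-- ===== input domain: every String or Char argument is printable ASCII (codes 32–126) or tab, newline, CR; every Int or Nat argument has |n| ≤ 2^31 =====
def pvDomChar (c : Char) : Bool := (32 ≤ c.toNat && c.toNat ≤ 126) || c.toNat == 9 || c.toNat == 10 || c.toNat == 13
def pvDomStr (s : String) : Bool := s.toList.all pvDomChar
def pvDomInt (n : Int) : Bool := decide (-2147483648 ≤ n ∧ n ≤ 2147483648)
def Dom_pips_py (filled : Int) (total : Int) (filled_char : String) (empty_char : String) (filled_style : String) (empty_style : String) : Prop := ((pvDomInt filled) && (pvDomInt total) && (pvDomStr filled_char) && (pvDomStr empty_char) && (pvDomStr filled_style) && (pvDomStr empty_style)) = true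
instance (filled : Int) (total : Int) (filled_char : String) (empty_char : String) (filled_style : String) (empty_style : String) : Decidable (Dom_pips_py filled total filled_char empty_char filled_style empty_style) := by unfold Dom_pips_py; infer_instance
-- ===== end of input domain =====

-- B builds the result by string arithmetic (tokens formatted once, repeated with the separator attached, last token bare)
-- instead of A's per-index classify/append loop with a final join; same cost, no list, no join, no loop.

-- ===== PORT A =====
-- port of A: per-index loop appending a styled-or-plain token for each i in range(total), then " ".join
def pips_py (filled : Int) (total : Int) (filled_char : String) (empty_char : String) (filled_style : String) (empty_style : String) : String :=
  let parts : List String :=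
    (PySem.List.pyRange 0 total 1).foldl (fun acc i =>
      let ch := if i < filled then filled_char else empty_char
      let style := if i < filled then filled_style else empty_style
      acc ++ [if style ≠ "" then "[" ++ style ++ "]" ++ ch ++ "[/]" else ch]) []
  PySem.Str.join " " parts

-- ===== PORT B =====
-- port of B: string repetition ((tok + " ") * n, via pyRepeat on the code points) with the last token appended bare
def pips_py_alt (filled : Int) (total : Int) (filled_char : String) (empty_char : String) (filled_style : String) (empty_style : String) : String :=
  let filled_tok := if filled_style ≠ "" then "[" ++ filled_style ++ "]" ++ filled_char ++ "[/]" else filled_char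
  let empty_tok := if empty_style ≠ "" then "[" ++ empty_style ++ "]" ++ empty_char ++ "[/]" else empty_char
  let n_filled : Int := min (max filled 0) (max total 0)
  let n_empty : Int := max total 0 - n_filled
  if n_empty > 0 then
    String.ofList (PySem.List.pyRepeat (filled_tok ++ " ").toList n_filled
      ++ PySem.List.pyRepeat (empty_tok ++ " ").toList (n_empty - 1) ++ empty_tok.toList)
  else if n_filled > 0 then
    String.ofList (PySem.List.pyRepeat (filled_tok ++ " ").toList (n_filled - 1) ++ filled_tok.toList)
  else ""

-- ===== PRECONDITION & SPEC =====
def Spec_pips_py (filled : Int) (total : Int) (filled_char : String) (empty_char : String) (filled_style : String) (empty_style : String) (out : String) : Prop := out = pips_py_alt filled total filled_char empty_char filled_style empty_style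
instance (filled : Int) (total : Int) (filled_char : String) (empty_char : String) (filled_style : String) (empty_style : String) (out : String) : Decidable (Spec_pips_py filled total filled_char empty_char filled_style empty_style out) := by unfold Spec_pips_py; infer_instance

-- ===== CLAIM (what is proved, stated in full; the proofs are below) =====
def Claim_equal_pips_py : Prop := ∀ (filled : Int) (total : Int) (filled_char : String) (empty_char : String) (filled_style : String) (empty_style : String), Dom_pips_py filled total filled_char empty_char filled_style empty_style → Spec_pips_py filled total filled_char empty_char filled_style empty_style (pips_py filled total filled_char empty_char filled_style empty_style)

-- ===== LEMMAS AND PROOFS =====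
-- append-style foldl is a map
theorem pv_foldl_map {α β : Type} (f : α → β) :
    ∀ (l : List α) (acc : List β),
      l.foldl (fun a i => a ++ [f i]) acc = acc ++ l.map f := by
  intro l
  induction l with
  | nil => intro acc; simp
  | cons x xs ih => intro acc; simp [List.foldl, ih]

-- the classified map over range n is two replicate runs
theorem pv_map_range_split (F E : String) (filled : Int) :
    ∀ n : Nat,
      (List.range n).map (fun k : Nat => if (k : Int) < filled then F else E)
        = List.replicate (min filled (n : Int)).toNat F
            ++ List.replicate (n - (min filled (n : Int)).toNat) E := by
  intro n
  induction n with
  | zero => simp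
  | succ n ih =>
    rw [List.range_succ, List.map_append, ih]
    by_cases h : (n : Int) < filled
    · have h1 : (min filled ((n : Int) + 1)).toNat = n + 1 := by omega
      have h2 : (min filled (n : Int)).toNat = n := by omega
      simp [h, h2, List.replicate_succ' (n := n)]
    · have h1 : (min filled ((n : Int) + 1)).toNat = (min filled (n : Int)).toNat := by omega
      have h2 : (min filled (n : Int)).toNat ≤ n := by omega
      push_cast
      rw [h1]
      simp only [List.map_cons, List.map_nil, if_neg h, List.append_assoc]
      congr 1
      have h3 : n + 1 - (min filled (n : Int)).toNat
          = (n - (min filled (n : Int)).toNat) + 1 := by omega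
      rw [h3, List.replicate_succ' (n := n - (min filled (n : Int)).toNat)]

-- A's loop result is two replicate runs with clamped counts
theorem pips_py_eq_join (filled total : Int) (F E : String) :
    (PySem.List.pyRange 0 total 1).foldl (fun acc i =>
        acc ++ [if i < filled then F else E]) []
      = List.replicate (max 0 (min filled total)).toNat F
          ++ List.replicate ((max 0 total) - (max 0 (min filled total))).toNat E := by
  rw [PySem.List.pyRange_one, pv_foldl_map, List.map_map]
  simp only [List.nil_append]
  have ha : (max 0 (min filled total)).toNat
      = (min filled (((total - 0).toNat : Nat) : Int)).toNat := by omega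
  have hb : ((max 0 total) - (max 0 (min filled total))).toNat
      = (total - 0).toNat - (min filled (((total - 0).toNat : Nat) : Int)).toNat := by omega
  rw [ha, hb, ← pv_map_range_split]
  apply List.map_congr_left
  intro k _
  simp only [Function.comp_apply, zero_add]

-- flatten of tokens-with-trailing-separator is the join followed by one separator (or empty)
theorem pv_flat_join (l : List (List Char)) :
    (l.map (fun s => s ++ [' '])).flatten
      = if l = [] then [] else PySem.Chars.join [' '] l ++ [' '] := by
  induction l with
  | nil => simp
  | cons x t ih =>
    cases t with
    | nil => simp [PySem.Chars.join_singleton]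
    | cons y u =>
      simp only [List.map_cons, List.flatten_cons] at ih ⊢
      rw [ih]
      simp [PySem.Chars.join_cons_cons]

-- the join of two replicated runs as B computes it: separator-attached repeats, last token bare
theorem pv_join_split (Fc Ec : List Char) (a b : Nat) :
    PySem.Chars.join [' '] (List.replicate a Fc ++ List.replicate b Ec)
      = if b > 0 then
          (List.replicate a (Fc ++ [' '])).flatten
            ++ (List.replicate (b - 1) (Ec ++ [' '])).flatten ++ Ec
        else if a > 0 then
          (List.replicate (a - 1) (Fc ++ [' '])).flatten ++ Fc
        else [] := by
  have hflat : ((List.replicate a Fc ++ List.replicate b Ec).map (fun s => s ++ [' '])).flatten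
      = (List.replicate a (Fc ++ [' '])).flatten ++ (List.replicate b (Ec ++ [' '])).flatten := by
    simp [List.map_replicate]
  by_cases hb : b > 0
  · have hne : (List.replicate a Fc ++ List.replicate b Ec : List (List Char)) ≠ [] := by
      apply List.ne_nil_of_length_pos; simp; omega
    have h := pv_flat_join (List.replicate a Fc ++ List.replicate b Ec)
    rw [if_neg hne] at h
    have hb' : b = (b - 1) + 1 := by omega
    have hrep : (List.replicate b (Ec ++ [' '])).flatten
        = (List.replicate (b - 1) (Ec ++ [' '])).flatten ++ (Ec ++ [' ']) := by
      conv_lhs => rw [hb', List.replicate_succ' (n := b - 1)]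
      simp
    rw [hflat, hrep] at h
    have h2 : (List.replicate a (Fc ++ [' '])).flatten
          ++ ((List.replicate (b - 1) (Ec ++ [' '])).flatten ++ (Ec ++ [' ']))
        = ((List.replicate a (Fc ++ [' '])).flatten
            ++ (List.replicate (b - 1) (Ec ++ [' '])).flatten ++ Ec) ++ [' '] := by
      simp [List.append_assoc]
    rw [h2] at h
    have := List.append_cancel_right h
    rw [if_pos hb]
    exact this.symm
  · have hb0 : b = 0 := by omega
    subst hb0
    by_cases ha : a > 0
    · have hne : (List.replicate a Fc ++ List.replicate 0 Ec : List (List Char)) ≠ [] := by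
        apply List.ne_nil_of_length_pos; simp; omega
      have h := pv_flat_join (List.replicate a Fc ++ List.replicate 0 Ec)
      rw [if_neg hne] at h
      have ha' : a = (a - 1) + 1 := by omega
      have hrep : (List.replicate a (Fc ++ [' '])).flatten
          = (List.replicate (a - 1) (Fc ++ [' '])).flatten ++ (Fc ++ [' ']) := by
        conv_lhs => rw [ha', List.replicate_succ' (n := a - 1)]
        simp
      rw [hflat] at h
      simp only [List.replicate, List.flatten_nil, List.append_nil] at h
      rw [hrep] at h
      have h2 : (List.replicate (a - 1) (Fc ++ [' '])).flatten ++ (Fc ++ [' '])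
          = ((List.replicate (a - 1) (Fc ++ [' '])).flatten ++ Fc) ++ [' '] := by
        simp [List.append_assoc]
      rw [h2] at h
      have := List.append_cancel_right h
      simp only [gt_iff_lt, Nat.lt_irrefl, if_false, if_pos ha, List.replicate_zero,
        List.append_nil]
      exact this.symm
    · have ha0 : a = 0 := by omega
      subst ha0
      simp [PySem.Chars.join, List.intercalate]

-- ===== VERDICT (by name: the statement is the Claim_ definition above) =====
theorem pips_py_spec : Claim_equal_pips_py := by
  intro filled total filled_char empty_char filled_style empty_style _
  unfold Spec_pips_py pips_py pips_py_alt
  set F := if filled_style ≠ "" then "[" ++ filled_style ++ "]" ++ filled_char ++ "[/]" else filled_char with hF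
  set E := if empty_style ≠ "" then "[" ++ empty_style ++ "]" ++ empty_char ++ "[/]" else empty_char with hE
  have hfold : (PySem.List.pyRange 0 total 1).foldl (fun acc i =>
      let ch := if i < filled then filled_char else empty_char
      let style := if i < filled then filled_style else empty_style
      acc ++ [if style ≠ "" then "[" ++ style ++ "]" ++ ch ++ "[/]" else ch]) []
      = (PySem.List.pyRange 0 total 1).foldl (fun acc i =>
          acc ++ [if i < filled then F else E]) [] := by
    apply PySem.List.foldl_congr_mem
    intro acc i _
    by_cases h : i < filled <;> simp [h, hF, hE]
  rw [hfold, pips_py_eq_join]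
  set nf : Int := min (max filled 0) (max total 0) with hnf
  set ne : Int := max total 0 - nf with hne
  have ha : (max 0 (min filled total)).toNat = nf.toNat := by omega
  have hbn : ((max 0 total) - (max 0 (min filled total))).toNat = ne.toNat := by omega
  apply String.toList_inj.mp
  rw [PySem.Str.toList_join, List.map_append, List.map_replicate, List.map_replicate, ha, hbn,
    show " ".toList = [' '] from rfl, pv_join_split]
  by_cases he : ne > 0
  · have hbpos : ne.toNat > 0 := by omega
    rw [if_pos he, if_pos hbpos]
    simp only [PySem.List.pyRepeat, String.toList_ofList, String.toList_append,
      show " ".toList = [' '] from rfl]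
    have h1 : (ne - 1).toNat = ne.toNat - 1 := by omega
    rw [h1]
  · have hbz : ¬ ne.toNat > 0 := by omega
    rw [if_neg he, if_neg hbz]
    by_cases hf : nf > 0
    · have hapos : nf.toNat > 0 := by omega
      rw [if_pos hf, if_pos hapos]
      simp only [PySem.List.pyRepeat, String.toList_ofList, String.toList_append,
        show " ".toList = [' '] from rfl]
      have h1 : (nf - 1).toNat = nf.toNat - 1 := by omega
      rw [h1]
    · have haz : ¬ nf.toNat > 0 := by omega
      rw [if_neg hf, if_neg haz]
      rfl
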